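-- pv_equiv track=rewrite | github.com/L3XxXa/VK-algo-course | tasks/5.1/5.1.py | max_product_subsequence
-- ===== SOURCE A (Python) =====
-- import math
--
-- def max_product_subsequence(n, arr, K):
--     max_product = 1
--     if K <= 0:
--         return 0
--     if K == 1:
--         return max(arr)
--     if K == n:
--         return math.prod(arr)
--     for i in range(n - K + 1):
--         product = 1
--         for j in range(K):
--             product *= arr[i + j]
--         max_product = max(max_product, product)
--     return max_product
-- ===== SOURCE B (Python) =====
-- import math
--
-- def max_product_subsequence(n, arr, K):
--     # single sliding-window pass: running product of the window's nonzero elements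
--     # plus a zero counter; exact integer division when an element leaves.
--     if K <= 0:
--         return 0
--     if K == 1:
--         return max(arr)
--     if K == n:
--         return math.prod(arr)
--     best = 1
--     nz = 1       # product of the nonzero elements of the current window
--     zeros = 0    # number of zeros in the current window
--     for i in range(n):
--         x = arr[i]
--         if x == 0:
--             zeros += 1
--         else:
--             nz *= x
--         if i >= K:
--             y = arr[i - K]
--             if y == 0:
--                 zeros -= 1
--             else:
--                 nz //= y
--         if i >= K - 1:
--             best = max(best, 0 if zeros else nz)
--     return best
-- ===== Notes on version B (the rewrite author's own statement) =====
-- stated objective: alternative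
-- what changed: Replaced the nested loop that recomputes every window product from scratch with a single sliding-window pass that maintains the product of the window's nonzero elements plus a zero counter, dividing out the element that leaves the window.
-- outside the precondition, e.g. on max_product_subsequence(5, [2, 3], 7): A returns 1, B raises IndexError
import Mathlib
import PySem

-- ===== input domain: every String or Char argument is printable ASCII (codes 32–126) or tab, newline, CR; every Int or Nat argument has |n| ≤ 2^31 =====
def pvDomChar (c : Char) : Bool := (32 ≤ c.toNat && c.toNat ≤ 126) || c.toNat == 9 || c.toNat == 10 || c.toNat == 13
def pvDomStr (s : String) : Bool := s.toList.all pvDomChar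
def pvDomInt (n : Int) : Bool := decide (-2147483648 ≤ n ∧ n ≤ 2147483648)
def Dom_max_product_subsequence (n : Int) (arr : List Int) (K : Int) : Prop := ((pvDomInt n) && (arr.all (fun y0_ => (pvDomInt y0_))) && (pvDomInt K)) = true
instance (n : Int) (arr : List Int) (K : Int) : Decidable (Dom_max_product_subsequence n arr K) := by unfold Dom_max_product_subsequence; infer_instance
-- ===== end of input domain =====

-- B replaces A's nested recomputation of every window product by one sliding-window
-- pass (running product of the window's nonzero elements + zero counter, exact division
-- on exit); equivalence of the RETURN values is proved on Pre_.

-- ===== PORT A =====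
def max_product_subsequence (n : Int) (arr : List Int) (K : Int) : Int :=
  if K ≤ 0 then 0
  else if K = 1 then (PySem.List.max? arr (fun x => x)).getD 0   -- max(arr); Pre_ excludes arr = []
  else if K = n then arr.prod                                    -- math.prod(arr)
  else
    (PySem.List.pyRange 0 (n - K + 1) 1).foldl
      (fun max_product i =>
        max max_product
          ((PySem.List.pyRange 0 K 1).foldl
            (fun product j => product * PySem.List.pyGetD arr (i + j) 0) 1))
      1

-- ===== PORT B =====
-- one iteration of B's single loop; state = (best, nz, zeros)
def pvBStep (arr : List Int) (K : Int) (s : Int × Int × Int) (i : Int) : Int × Int × Int :=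
  let x := PySem.List.pyGetD arr i 0
  let nz := if x = 0 then s.2.1 else s.2.1 * x
  let zeros := if x = 0 then s.2.2 + 1 else s.2.2
  let y := PySem.List.pyGetD arr (i - K) 0
  let nz2 := if K ≤ i then (if y = 0 then nz else PySem.Int.floordiv nz y) else nz
  let zeros2 := if K ≤ i then (if y = 0 then zeros - 1 else zeros) else zeros
  let best := if K - 1 ≤ i then max s.1 (if zeros2 ≠ 0 then 0 else nz2) else s.1
  (best, nz2, zeros2)

def max_product_subsequence_alt (n : Int) (arr : List Int) (K : Int) : Int :=
  if K ≤ 0 then 0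
  else if K = 1 then (PySem.List.max? arr (fun x => x)).getD 0
  else if K = n then arr.prod
  else ((PySem.List.pyRange 0 n 1).foldl (pvBStep arr K) (1, 1, 0)).1

-- ===== PRECONDITION & SPEC =====
-- Pre_ excludes (a) K == 1 with empty arr, where A raises ValueError (max of empty), and
-- (b) the windowed branch (2 ≤ K, K ≠ n) when n overstates the array length: there A
-- raises IndexError whenever a window exists (K < n), and when no window fits (n < K)
-- A returns its accidental initial 1 while B's single pass raises IndexError.
def Pre_max_product_subsequence (n : Int) (arr : List Int) (K : Int) : Prop :=
  (K = 1 → arr ≠ []) ∧ (2 ≤ K → K ≠ n → n ≤ (arr.length : Int))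
instance (n : Int) (arr : List Int) (K : Int) : Decidable (Pre_max_product_subsequence n arr K) := by
  unfold Pre_max_product_subsequence; infer_instance

def pvWitness_max_product_subsequence : Int × List Int × Int := (4, [1, 2, 3, 4], 2)

def Spec_max_product_subsequence (n : Int) (arr : List Int) (K : Int) (out : Int) : Prop := out = max_product_subsequence_alt n arr K
instance (n : Int) (arr : List Int) (K : Int) (out : Int) : Decidable (Spec_max_product_subsequence n arr K out) := by unfold Spec_max_product_subsequence; infer_instance

-- ===== CLAIM (what is proved, stated in full; the proofs are below) =====
def Claim_equal_max_product_subsequence : Prop := ∀ (n : Int) (arr : List Int) (K : Int), Dom_max_product_subsequence n arr K → Pre_max_product_subsequence n arr K → Spec_max_product_subsequence n arr K (max_product_subsequence n arr K)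

-- ===== LEMMAS AND PROOFS =====

-- the current window after processing the first m elements
def pvWin (arr : List Int) (k m : Nat) : List Int := (arr.drop (m - k)).take (min m k)
-- product of the window starting at t
def pvP (arr : List Int) (k t : Nat) : Int := ((arr.drop t).take k).prod
-- best over the first (m+1-k) windows, max'd with the initial 1
def pvBest (arr : List Int) (k m : Nat) : Int :=
  (List.range (m + 1 - k)).foldl (fun b t => max b (pvP arr k t)) 1

lemma pv_floordiv_mul_left (y q : Int) (hy : y ≠ 0) : PySem.Int.floordiv (y * q) y = q := by
  have h1 := PySem.Int.floordiv_mul_add_mod (y * q) y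
  have h2 : PySem.Int.mod (y * q) y = 0 := by
    rw [PySem.Int.mod_eq_zero_iff_dvd]
    exact dvd_mul_right y q
  have h3 : PySem.Int.floordiv (y * q) y * y = q * y := by rw [mul_comm q y]; omega
  exact mul_right_cancel₀ hy h3

lemma pv_prod_split (l : List Int) :
    (if (l.count 0 : Int) ≠ 0 then 0 else (l.filter (fun x => x ≠ 0)).prod) = l.prod := by
  by_cases h : (0 : Int) ∈ l
  · have hc : l.count 0 ≠ 0 := by simpa [List.count_eq_zero] using h
    have : ((l.count 0 : Int)) ≠ 0 := by exact_mod_cast hc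
    rw [if_pos this, Eq.comm, List.prod_eq_zero_iff]
    exact h
  · have hc : l.count 0 = 0 := List.count_eq_zero.mpr h
    have hf : l.filter (fun x => x ≠ 0) = l := by
      apply List.filter_eq_self.mpr
      intro a ha; simp; rintro rfl; exact h ha
    have hcz : ((l.count 0 : Int)) = 0 := by exact_mod_cast hc
    rw [if_neg (by simp [hcz]), hf]
lemma pv_win_succ_lt (arr : List Int) (k m : Nat) (h : m < k) (hm : m < arr.length) :
    pvWin arr k (m + 1) = pvWin arr k m ++ [arr[m]] := by
  unfold pvWin
  have h1 : m - k = 0 := by omega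
  have h2 : m + 1 - k = 0 := by omega
  have h3 : min m k = m := by omega
  have h4 : min (m + 1) k = m + 1 := by omega
  rw [h1, h2, h3, h4, List.drop_zero, List.take_add_one, List.getElem?_eq_getElem hm]
  simp
lemma pv_win_ge_head (arr : List Int) (k m : Nat) (hk : 1 ≤ k) (h : k ≤ m) (hm : m < arr.length) :
    pvWin arr k m = arr[m - k]'(Nat.lt_of_le_of_lt (Nat.sub_le m k) hm) :: (arr.drop (m - k + 1)).take (k - 1) := by
  obtain ⟨k', rfl⟩ : ∃ k', k = k' + 1 := ⟨k - 1, by omega⟩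
  unfold pvWin
  have h3 : min m (k' + 1) = k' + 1 := by omega
  have hd := List.drop_eq_getElem_cons (l := arr) (i := m - (k' + 1)) (by omega)
  rw [h3, hd, List.take_succ_cons]
  norm_num
lemma pv_win_ge_succ (arr : List Int) (k m : Nat) (hk : 1 ≤ k) (h : k ≤ m) (hm : m < arr.length) :
    pvWin arr k (m + 1) = (arr.drop (m - k + 1)).take (k - 1) ++ [arr[m]] := by
  obtain ⟨k', rfl⟩ : ∃ k', k = k' + 1 := ⟨k - 1, by omega⟩
  unfold pvWin
  have h3 : min (m + 1) (k' + 1) = k' + 1 := by omega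
  have h4 : m + 1 - (k' + 1) = m - (k' + 1) + 1 := by omega
  rw [h3, h4, List.take_add_one]
  have h5 : (List.drop (m - (k' + 1) + 1) arr)[k']? = some arr[m] := by
    rw [List.getElem?_drop]
    have : m - (k' + 1) + 1 + k' = m := by omega
    rw [this, List.getElem?_eq_getElem hm]
  simp [h5]
lemma pv_win_full (arr : List Int) (k m : Nat) (h : k ≤ m + 1) :
    pvWin arr k (m + 1) = (arr.drop (m + 1 - k)).take k := by
  unfold pvWin
  have : min (m + 1) k = k := by omega
  rw [this]

-- B invariant: after processing the first m elements the state is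
-- (best so far, product of the window's nonzeros, number of zeros in the window)
lemma pvB_inv (arr : List Int) (k : Nat) (hk : 2 ≤ k) :
    ∀ m : Nat, m ≤ arr.length →
    (PySem.List.pyRange 0 (m : Int) 1).foldl (pvBStep arr (k : Int)) (1, 1, 0)
      = (pvBest arr k m, ((pvWin arr k m).filter (fun x => x ≠ 0)).prod,
         ((pvWin arr k m).count 0 : Int)) := by
  intro m
  induction m with
  | zero =>
      intro _
      rw [PySem.List.pyRange_one_eq_nil (by omega)]
      simp [pvBest, pvWin, List.range_eq_nil.mpr (by omega : 0 + 1 - k = 0)]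
  | succ m ih =>
      intro hm
      have hm' : m < arr.length := by omega
      have hcast : ((m + 1 : Nat) : Int) = (m : Int) + 1 := by push_cast; ring
      rw [hcast, PySem.List.pyRange_one_succ_right (by positivity), List.foldl_append,
          ih (by omega)]
      simp only [List.foldl_cons, List.foldl_nil]
      have hx : PySem.List.pyGetD arr (m : Int) 0 = arr[m] := by
        simp [PySem.List.pyGetD_natCast, List.getD_eq_getElem?_getD, List.getElem?_eq_getElem hm']
      unfold pvBStep
      simp only [hx]
      by_cases hkm : k ≤ m
      · -- removal branch active
        have hc1 : ((k : Int) ≤ (m : Int)) := by exact_mod_cast hkm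
        have hc2 : ((k : Int) - 1 ≤ (m : Int)) := by omega
        have hy : PySem.List.pyGetD arr ((m : Int) - (k : Int)) 0 = arr[m - k]'(by omega) := by
          have : (m : Int) - (k : Int) = ((m - k : Nat) : Int) := by omega
          rw [this]
          simp [PySem.List.pyGetD_natCast, List.getD_eq_getElem?_getD,
                List.getElem?_eq_getElem (by omega : m - k < arr.length)]
        simp only [hy, if_pos hc1, if_pos hc2]
        have hw := pv_win_ge_head arr k m (by omega) hkm hm'
        have hw' := pv_win_ge_succ arr k m (by omega) hkm hm'
        set y := arr[m - k]'(by omega) with hydef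
        set mid := (arr.drop (m - k + 1)).take (k - 1) with hmid
        -- new zeros / nz
        have hzeros : ∀ b : Int,
            (if arr[m] = 0 then (((pvWin arr k m).count 0 : Int)) + 1 else ((pvWin arr k m).count 0 : Int))
              = ((mid ++ [arr[m]]).count 0 : Int) + (if y = 0 then 1 else 0) := by
          intro _
          rw [hw]
          by_cases hx0 : arr[m] = 0 <;> by_cases hy0 : y = 0 <;>
            simp [hx0, hy0, List.count_cons, List.count_append] <;> push_cast <;> ring
        have hnz : (if arr[m] = 0 then ((pvWin arr k m).filter (fun x => x ≠ 0)).prod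
                    else ((pvWin arr k m).filter (fun x => x ≠ 0)).prod * arr[m])
              = (if y = 0 then ((mid ++ [arr[m]]).filter (fun x => x ≠ 0)).prod
                 else y * ((mid ++ [arr[m]]).filter (fun x => x ≠ 0)).prod) := by
          rw [hw]
          by_cases hx0 : arr[m] = 0 <;> by_cases hy0 : y = 0 <;>
            simp [hx0, hy0, List.filter_cons, List.filter_append, mul_comm, mul_assoc, mul_left_comm]
        -- put the new window in place
        have hzeros2 : (if y = 0
              then (if arr[m] = 0 then (((pvWin arr k m).count 0 : Int)) + 1 else ((pvWin arr k m).count 0 : Int)) - 1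
              else (if arr[m] = 0 then (((pvWin arr k m).count 0 : Int)) + 1 else ((pvWin arr k m).count 0 : Int)))
            = ((pvWin arr k (m + 1)).count 0 : Int) := by
          rw [hw']
          have := hzeros 0
          by_cases hy0 : y = 0 <;> simp only [hy0, if_pos, if_neg, this] <;> simp [hy0] at this ⊢ <;> omega
        have hnz2 : (if y = 0
              then (if arr[m] = 0 then ((pvWin arr k m).filter (fun x => x ≠ 0)).prod
                    else ((pvWin arr k m).filter (fun x => x ≠ 0)).prod * arr[m])
              else PySem.Int.floordiv
                    (if arr[m] = 0 then ((pvWin arr k m).filter (fun x => x ≠ 0)).prod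
                     else ((pvWin arr k m).filter (fun x => x ≠ 0)).prod * arr[m]) y)
            = ((pvWin arr k (m + 1)).filter (fun x => x ≠ 0)).prod := by
          rw [hw']
          by_cases hy0 : y = 0
          · simp only [hy0, if_pos] at hnz ⊢
            simpa [hy0] using hnz
          · simp only [hy0, if_neg, ite_false] at hnz ⊢
            rw [hnz, pv_floordiv_mul_left _ _ hy0]
        rw [hzeros2, hnz2]
        -- best: a window completes
        have hbest : max (pvBest arr k m)
              (if ((pvWin arr k (m + 1)).count 0 : Int) ≠ 0 then 0
               else ((pvWin arr k (m + 1)).filter (fun x => x ≠ 0)).prod)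
            = pvBest arr k (m + 1) := by
          rw [pv_prod_split]
          unfold pvBest
          have : m + 1 + 1 - k = (m + 1 - k) + 1 := by omega
          rw [this, List.range_succ, List.foldl_append]
          simp only [List.foldl_cons, List.foldl_nil]
          congr 1
          rw [pv_win_full arr k m (by omega)]
          rfl
        rw [hbest]
      · -- no removal: m < k
        have hc1 : ¬((k : Int) ≤ (m : Int)) := by exact_mod_cast hkm
        simp only [if_neg hc1]
        have hw := pv_win_succ_lt arr k m (by omega) hm'
        have hzeros : (if arr[m] = 0 then (((pvWin arr k m).count 0 : Int)) + 1 else ((pvWin arr k m).count 0 : Int))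
            = ((pvWin arr k (m + 1)).count 0 : Int) := by
          rw [hw]
          by_cases hx0 : arr[m] = 0 <;> simp [hx0, List.count_append] <;> push_cast <;> ring
        have hnz : (if arr[m] = 0 then ((pvWin arr k m).filter (fun x => x ≠ 0)).prod
                    else ((pvWin arr k m).filter (fun x => x ≠ 0)).prod * arr[m])
            = ((pvWin arr k (m + 1)).filter (fun x => x ≠ 0)).prod := by
          rw [hw]
          by_cases hx0 : arr[m] = 0 <;> simp [hx0, List.filter_append]
        rw [hzeros, hnz]
        by_cases hrec : k ≤ m + 1
        · -- m = k - 1 : first full window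
          have hc2 : ((k : Int) - 1 ≤ (m : Int)) := by omega
          simp only [if_pos hc2]
          have hbest : max (pvBest arr k m)
                (if ((pvWin arr k (m + 1)).count 0 : Int) ≠ 0 then 0
                 else ((pvWin arr k (m + 1)).filter (fun x => x ≠ 0)).prod)
              = pvBest arr k (m + 1) := by
            rw [pv_prod_split]
            unfold pvBest
            have h0 : m + 1 - k = 0 := by omega
            have h1 : m + 1 + 1 - k = 1 := by omega
            rw [h0, h1, List.range_succ]
            simp only [List.range_zero, List.nil_append, List.foldl_cons, List.foldl_nil]
            congr 1
            rw [pv_win_full arr k m (by omega)]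
            simp [pvP, h0]
          rw [hbest]
        · have hc2 : ¬((k : Int) - 1 ≤ (m : Int)) := by omega
          simp only [if_neg hc2]
          have : pvBest arr k (m + 1) = pvBest arr k m := by
            unfold pvBest
            have h0 : m + 1 - k = 0 := by omega
            have h1 : m + 1 + 1 - k = 0 := by omega
            rw [h0, h1]
          rw [this]

-- A's inner loop computes the window product
lemma pvA_inner (arr : List Int) (i : Nat) :
    ∀ k : Nat, i + k ≤ arr.length →
    (PySem.List.pyRange 0 (k : Int) 1).foldl
        (fun product j => product * PySem.List.pyGetD arr ((i : Int) + j) 0) 1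
      = pvP arr k i := by
  intro k
  induction k with
  | zero => intro _; rw [PySem.List.pyRange_one_eq_nil (by omega)]; simp [pvP]
  | succ k ih =>
      intro h
      have hcast : ((k + 1 : Nat) : Int) = (k : Int) + 1 := by push_cast; ring
      rw [hcast, PySem.List.pyRange_one_succ_right (by positivity), List.foldl_append, ih (by omega)]
      simp only [List.foldl_cons, List.foldl_nil]
      have hik : i + k < arr.length := by omega
      have hg : PySem.List.pyGetD arr ((i : Int) + (k : Int)) 0 = arr[i + k] := by
        have h1 : (i : Int) + (k : Int) = ((i + k : Nat) : Int) := by push_cast; ring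
        rw [h1, PySem.List.pyGetD_natCast]
        simp [List.getD_eq_getElem?_getD, List.getElem?_eq_getElem hik]
      rw [hg]
      unfold pvP
      rw [List.take_add_one]
      have : (arr.drop i)[k]? = some arr[i + k] := by
        rw [List.getElem?_drop, List.getElem?_eq_getElem hik]
      rw [this]
      simp

-- A's double loop equals pvBest
lemma pvA_main (arr : List Int) (k N : Nat) (hk : 2 ≤ k) (hN : N ≤ arr.length) :
    (PySem.List.pyRange 0 ((N : Int) - (k : Int) + 1) 1).foldl
        (fun b i =>
          max b ((PySem.List.pyRange 0 (k : Int) 1).foldl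
            (fun product j => product * PySem.List.pyGetD arr (i + j) 0) 1))
        1
      = pvBest arr k N := by
  have hcong : ∀ (b : Int) (i : Int), i ∈ PySem.List.pyRange 0 ((N : Int) - (k : Int) + 1) 1 →
      max b ((PySem.List.pyRange 0 (k : Int) 1).foldl
          (fun product j => product * PySem.List.pyGetD arr (i + j) 0) 1)
        = max b (pvP arr k i.toNat) := by
    intro b i hi
    rw [PySem.List.mem_pyRange_one] at hi
    obtain ⟨t, rfl⟩ : ∃ t : Nat, i = (t : Int) := ⟨i.toNat, (Int.toNat_of_nonneg hi.1).symm⟩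
    have ht : t + k ≤ N := by omega
    rw [pvA_inner arr t k (by omega)]
    simp
  refine Eq.trans (PySem.List.foldl_congr_mem _ _ (fun b i => max b (pvP arr k i.toNat)) 1 hcong) ?_
  rw [PySem.List.pyRange_one]
  have htn : ((N : Int) - (k : Int) + 1 - 0).toNat = N + 1 - k := by omega
  rw [htn, List.foldl_map]
  unfold pvBest
  apply PySem.List.foldl_congr_mem
  intro b t _
  norm_num

-- ===== VERDICT (by name: the statement is the Claim_ definition above) =====
theorem max_product_subsequence_spec : Claim_equal_max_product_subsequence := by
  intro n arr K _ hpre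
  unfold Spec_max_product_subsequence max_product_subsequence max_product_subsequence_alt
  by_cases h0 : K ≤ 0
  · simp [h0]
  by_cases h1 : K = 1
  · simp [h1]
  by_cases hn : K = n
  · simp [hn]
  simp only [if_neg h0, if_neg h1, if_neg hn]
  have hK2 : 2 ≤ K := by omega
  have hlen : n ≤ (arr.length : Int) := hpre.2 hK2 hn
  by_cases hneg : n < 0
  · rw [PySem.List.pyRange_one_eq_nil (show n - K + 1 ≤ 0 by omega),
        PySem.List.pyRange_one_eq_nil (show n ≤ 0 by omega)]
    simp
  · rw [not_lt] at hneg
    obtain ⟨N, rfl⟩ : ∃ N : Nat, n = (N : Int) := ⟨n.toNat, (Int.toNat_of_nonneg hneg).symm⟩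
    obtain ⟨k, rfl⟩ : ∃ k : Nat, K = (k : Int) := ⟨K.toNat, (Int.toNat_of_nonneg (by omega)).symm⟩
    have hk : 2 ≤ k := by exact_mod_cast hK2
    have hNlen : N ≤ arr.length := by exact_mod_cast hlen
    rw [pvA_main arr k N hk hNlen, pvB_inv arr k hk N hNlen]
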